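-- pv_equiv track=rewrite | github.com/Ayoeunice/python_training | string_exercise/exercise_7.py | are_strings_balanced
-- ===== SOURCE A (Python) =====
-- def are_strings_balanced(s1, s2):
--     # Convert both strings to lowercase for case-insensitive comparison
--     s1 = s1.lower()
--     s2 = s2.lower()
--
--     # Create a dictionary to count characters in s2
--     char_count = {}
--
--     # Count characters in s2
--     for char in s2:
--         char_count[char] = char_count.get(char, 0) + 1
--
--     # Check if all characters in s1 are present in s2
--     for char in s1:
--         if char not in char_count or char_count[char] == 0:
--             return False
--         char_count[char] -= 1
--
--     return True
-- ===== SOURCE B (Python) =====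
-- def are_strings_balanced(s1, s2):
--     # For every distinct character of s1 (lowercased), compare whole-string
--     # occurrence counts instead of consuming a mutable character budget.
--     s1 = s1.lower()
--     s2 = s2.lower()
--     return all(s1.count(c) <= s2.count(c) for c in set(s1))
-- ===== Notes on version B (the rewrite author's own statement) =====
-- stated objective: idiomatic
-- what changed: A's build-a-dict-then-consume-with-early-exit pass is replaced by whole-count comparison: for each distinct lowercased character of s1, compare s1.count(c) with s2.count(c); no dictionary, no decrementing, no early return.
import Mathlib
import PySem

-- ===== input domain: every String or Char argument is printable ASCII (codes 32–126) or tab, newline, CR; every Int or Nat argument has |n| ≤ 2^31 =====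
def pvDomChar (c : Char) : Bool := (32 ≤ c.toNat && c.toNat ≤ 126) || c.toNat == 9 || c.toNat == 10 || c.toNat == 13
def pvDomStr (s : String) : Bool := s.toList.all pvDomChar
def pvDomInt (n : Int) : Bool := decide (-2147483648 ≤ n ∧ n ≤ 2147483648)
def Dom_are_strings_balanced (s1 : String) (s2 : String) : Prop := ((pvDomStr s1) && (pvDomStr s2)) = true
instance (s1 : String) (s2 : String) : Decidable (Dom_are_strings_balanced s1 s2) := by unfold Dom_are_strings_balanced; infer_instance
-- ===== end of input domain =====

-- B replaces A's build-a-dict-then-consume pass by per-distinct-character whole-count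
-- comparisons (idiomatic all/count over set(s1)); equivalence proved on all inputs.


-- ===== PORT A =====
-- 'for char in s2: char_count[char] = char_count.get(char, 0) + 1'
def pvCountA (l : List Char) : PySem.Dict Char Int :=
  l.foldl (fun d c => d.insert c (d.getD c 0 + 1)) PySem.Dict.empty

-- 'for char in s1: if char not in char_count or char_count[char] == 0: return False; char_count[char] -= 1'
def pvLoopA : PySem.Dict Char Int → List Char → Bool
  | _, [] => true
  | d, c :: rest =>
    if !(d.contains c) || (d.getD c 0 == 0) then false
    else pvLoopA (d.modify c 0 (· - 1)) rest

def are_strings_balanced (s1 : String) (s2 : String) : Bool :=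
  let s1' := PySem.Str.lower s1
  let s2' := PySem.Str.lower s2
  pvLoopA (pvCountA s2'.toList) s1'.toList

-- ===== PORT B =====
-- 'return all(s1.count(c) <= s2.count(c) for c in set(s1))'
def are_strings_balanced_alt (s1 : String) (s2 : String) : Bool :=
  let s1' := PySem.Str.lower s1
  let s2' := PySem.Str.lower s2
  (PySem.Set.ofList s1'.toList).all
    (fun c => PySem.Str.count s1' (String.ofList [c]) ≤ PySem.Str.count s2' (String.ofList [c]))

-- ===== PRECONDITION & SPEC =====
def Spec_are_strings_balanced (s1 : String) (s2 : String) (out : Bool) : Prop := out = are_strings_balanced_alt s1 s2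
instance (s1 : String) (s2 : String) (out : Bool) : Decidable (Spec_are_strings_balanced s1 s2 out) := by unfold Spec_are_strings_balanced; infer_instance

-- ===== CLAIM (what is proved, stated in full; the proofs are below) =====
def Claim_equal_are_strings_balanced : Prop := ∀ (s1 : String) (s2 : String), Dom_are_strings_balanced s1 s2 → Spec_are_strings_balanced s1 s2 (are_strings_balanced s1 s2)

-- ===== LEMMAS AND PROOFS =====

-- Python str.count with a single-character needle is the character count.
theorem pv_count_go_single (c : Char) :
    ∀ (l : List Char) (fuel acc : Nat), l.length ≤ fuel →
      PySem.Chars.count.go [c] fuel l acc = acc + l.count c := by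
  intro l
  induction l with
  | nil =>
      intro fuel acc _
      cases fuel <;> simp [PySem.Chars.count.go]
  | cons h t ih =>
      intro fuel acc hf
      cases fuel with
      | zero => simp at hf
      | succ n =>
          simp only [List.length_cons, Nat.succ_le_succ_iff] at hf
          by_cases hc : c = h
          · subst hc
            have : [c].isPrefixOf (c :: t) = true := by simp [List.isPrefixOf]
            simp [PySem.Chars.count.go, this, ih n (acc + 1) hf]
            omega
          · have : [c].isPrefixOf (h :: t) = false := by
              simp [List.isPrefixOf]; exact hc
            simp [PySem.Chars.count.go, this, ih n acc hf, eq_comm, hc]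

theorem pv_count_single (l : List Char) (c : Char) :
    PySem.Chars.count l [c] = l.count c := by
  simp [PySem.Chars.count]
  simpa using pv_count_go_single c l l.length 0 le_rfl

-- A's counting loop from an empty dict is PySem's counter.
theorem pvCountA_getD (l : List Char) (c : Char) :
    (pvCountA l).getD c 0 = (l.count c : Int) := by
  unfold pvCountA
  rw [PySem.Dict.foldl_insert_getD_add_one_eq_counter, PySem.Dict.getD_counter]

-- A's consuming loop succeeds iff every character count fits the budget in d.
theorem pvLoopA_iff (l : List Char) :
    ∀ d : PySem.Dict Char Int, (∀ c, 0 ≤ d.getD c 0) →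
      (pvLoopA d l = true ↔ ∀ c, (l.count c : Int) ≤ d.getD c 0) := by
  induction l with
  | nil =>
      intro d hd
      simp [pvLoopA]
      intro c; simpa using hd c
  | cons a t ih =>
      intro d hd
      by_cases hz : d.getD a 0 = 0
      · have hcond : (!(d.contains a) || (d.getD a 0 == 0)) = true := by
          simp [hz]
        constructor
        · intro h; rw [pvLoopA, hcond] at h; simp at h
        · intro h
          exfalso
          have := h a
          rw [hz] at this
          have : ((a :: t).count a : Int) ≤ 0 := this
          simp at this
          omega
      · have hcont : d.contains a = true := by
          by_contra hnc
          exact hz (PySem.Dict.getD_of_not_contains d 0 (by simpa using hnc))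
        have hcond : (!(d.contains a) || (d.getD a 0 == 0)) = false := by
          simp [hcont, hz]
        have hd' : ∀ c, 0 ≤ (d.modify a 0 (· - 1)).getD c 0 := by
          intro c
          rw [PySem.Dict.getD_modify]
          split_ifs with he
          · subst he
            have h1 := hd c
            omega
          · exact hd c
        rw [pvLoopA, hcond]
        simp only [Bool.false_eq_true, if_false]
        rw [ih (d.modify a 0 (· - 1)) hd']
        constructor
        · intro h c
          have := h c
          rw [PySem.Dict.getD_modify] at this
          by_cases he : c = a
          · subst he
            simp at this ⊢
            omega
          · have hne : ¬ a = c := fun e => he e.symm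
            simp [he, hne] at this ⊢
            exact this
        · intro h c
          have := h c
          rw [PySem.Dict.getD_modify]
          by_cases he : c = a
          · subst he
            simp at this ⊢
            omega
          · have hne : ¬ a = c := fun e => he e.symm
            simp [he, hne] at this ⊢
            exact this

-- B as a proposition over the lowered character lists.
theorem pv_alt_iff (s1 s2 : String) :
    are_strings_balanced_alt s1 s2 = true ↔
      ∀ c ∈ (PySem.Str.lower s1).toList,
        (PySem.Str.lower s1).toList.count c ≤ (PySem.Str.lower s2).toList.count c := by
  unfold are_strings_balanced_alt
  simp only [List.all_eq_true, PySem.Str.count_eq, decide_eq_true_eq]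
  constructor
  · intro h c hc
    have := h c (by simpa [PySem.Set.mem_ofList] using hc)
    simpa [String.toList_ofList, pv_count_single] using this
  · intro h c hc
    have hc' : c ∈ (PySem.Str.lower s1).toList := by
      simpa [PySem.Set.mem_ofList] using hc
    simpa [String.toList_ofList, pv_count_single] using h c hc'

-- ===== VERDICT (by name: the statement is the Claim_ definition above) =====
theorem are_strings_balanced_spec : Claim_equal_are_strings_balanced := by
  intro s1 s2 _
  unfold Spec_are_strings_balanced
  set l1 := (PySem.Str.lower s1).toList with hl1
  set l2 := (PySem.Str.lower s2).toList with hl2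
  have hA : are_strings_balanced s1 s2 = true ↔ ∀ c, (l1.count c : Int) ≤ l2.count c := by
    unfold are_strings_balanced
    rw [pvLoopA_iff l1 (pvCountA l2) (fun c => by rw [pvCountA_getD]; positivity)]
    constructor
    · intro h c; rw [← pvCountA_getD l2 c]; exact h c
    · intro h c; rw [pvCountA_getD]; exact h c
  have hB := pv_alt_iff s1 s2
  rw [← hl1, ← hl2] at hB
  have : are_strings_balanced s1 s2 = true ↔ are_strings_balanced_alt s1 s2 = true := by
    rw [hA, hB]
    constructor
    · intro h c _
      have := h c
      exact_mod_cast this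
    · intro h c
      by_cases hc : c ∈ l1
      · exact_mod_cast h c hc
      · simp [List.count_eq_zero_of_not_mem hc]
  exact Bool.eq_iff_iff.mpr this
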